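-- pv_equiv track=rewrite | github.com/KatarinaYuan/VCWorld | src/cli_pipeline/tools/run_ttt_lite.py | _is_fatal_cuda_error
-- ===== SOURCE A (Python) =====
-- def _is_fatal_cuda_error(msg: str) -> bool:
--     s = msg.lower()
--     fatal_patterns = (
--         "unspecified launch failure",
--         "device-side assert",
--         "cuda error",
--         "cublas",
--         "cudnn",
--         "nccl",
--     )
--     return any(p in s for p in fatal_patterns)
-- ===== SOURCE B (Python) =====
-- _FATAL_PATTERNS = (
--     "unspecified launch failure",
--     "device-side assert",
--     "cuda error",
--     "cublas",
--     "cudnn",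
--     "nccl",
-- )
--
--
-- def _matches_at(msg, i, p):
--     if i + len(p) > len(msg):
--         return False
--     for k in range(len(p)):
--         if msg[i + k].lower() != p[k]:
--             return False
--     return True
--
--
-- def _is_fatal_cuda_error(msg: str) -> bool:
--     # one scan over positions, testing each pattern case-insensitively in place
--     for i in range(len(msg)):
--         for p in _FATAL_PATTERNS:
--             if _matches_at(msg, i, p):
--                 return True
--     return False
-- ===== Notes on version B (the rewrite author's own statement) =====
-- stated objective: alternative
-- what changed: B replaces A's lowered-copy plus six independent substring searches by a single left-to-right scan over positions with in-place case-insensitive prefix tests, never materialising msg.lower().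
import Mathlib
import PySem

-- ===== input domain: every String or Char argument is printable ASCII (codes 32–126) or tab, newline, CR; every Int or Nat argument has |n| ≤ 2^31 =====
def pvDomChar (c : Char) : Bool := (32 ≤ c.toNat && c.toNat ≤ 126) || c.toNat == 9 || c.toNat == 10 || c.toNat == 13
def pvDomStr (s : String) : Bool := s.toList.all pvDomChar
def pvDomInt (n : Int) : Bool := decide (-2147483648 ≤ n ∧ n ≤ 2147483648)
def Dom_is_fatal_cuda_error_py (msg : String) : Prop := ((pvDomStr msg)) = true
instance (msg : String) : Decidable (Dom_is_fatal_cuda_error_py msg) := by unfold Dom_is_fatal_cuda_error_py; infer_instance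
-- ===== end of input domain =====

-- B replaces the lowered copy + six independent substring searches by ONE scan over
-- positions with in-place case-insensitive prefix tests (objective: alternative).

-- ===== PORT A =====
-- s = msg.lower(); any(p in s for p in fatal_patterns)
def is_fatal_cuda_error_py (msg : String) : Bool :=
  let s := PySem.Str.lower msg
  ["unspecified launch failure", "device-side assert", "cuda error",
   "cublas", "cudnn", "nccl"].any (fun p => PySem.Str.isIn p s)

-- ===== PORT B =====
def pvFatalPatterns : List String :=
  ["unspecified launch failure", "device-side assert", "cuda error",
   "cublas", "cudnn", "nccl"]

-- _matches_at: does pattern p match case-insensitively at the head of l?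
def pvMatchAt : List Char → List Char → Bool
  | [], _ => true
  | _ :: _, [] => false
  | p :: ps, c :: cs => (PySem.Chars.lowerChar c == p) && pvMatchAt ps cs

-- the scan over positions (for i in range(len(msg)): for p in patterns: …)
def pvScan : List Char → Bool
  | [] => false
  | c :: cs =>
    pvFatalPatterns.any (fun p => pvMatchAt p.toList (c :: cs)) || pvScan cs

def is_fatal_cuda_error_py_alt (msg : String) : Bool :=
  pvScan msg.toList

-- ===== PRECONDITION & SPEC =====
def Spec_is_fatal_cuda_error_py (msg : String) (out : Bool) : Prop := out = is_fatal_cuda_error_py_alt msg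
instance (msg : String) (out : Bool) : Decidable (Spec_is_fatal_cuda_error_py msg out) := by unfold Spec_is_fatal_cuda_error_py; infer_instance

-- ===== CLAIM (what is proved, stated in full; the proofs are below) =====
def Claim_equal_is_fatal_cuda_error_py : Prop := ∀ (msg : String), Dom_is_fatal_cuda_error_py msg → Spec_is_fatal_cuda_error_py msg (is_fatal_cuda_error_py msg)

-- ===== LEMMAS AND PROOFS =====

theorem pvMatchAt_iff (ps l : List Char) :
    pvMatchAt ps l = true ↔ ps <+: PySem.Chars.lower l := by
  induction ps generalizing l with
  | nil => simp [pvMatchAt]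
  | cons p ps ih =>
    cases l with
    | nil => simp [pvMatchAt, PySem.Chars.lower]
    | cons c cs =>
      simp only [pvMatchAt, Bool.and_eq_true, beq_iff_eq, ih,
        PySem.Chars.lower, List.map_cons, List.cons_prefix_cons]
      exact ⟨fun ⟨h1, h2⟩ => ⟨h1.symm, h2⟩, fun ⟨h1, h2⟩ => ⟨h1.symm, h2⟩⟩

theorem pvScan_iff (l : List Char) :
    pvScan l = true ↔
      ∃ j, (pvFatalPatterns.any (fun p => pvMatchAt p.toList (l.drop j))) = true := by
  induction l with
  | nil =>
    simp only [pvScan, List.drop_nil]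
    constructor
    · exact fun h => absurd h (by decide)
    · rintro ⟨j, hj⟩; exact absurd hj (by decide)
  | cons c cs ih =>
    simp only [pvScan, Bool.or_eq_true, ih]
    constructor
    · rintro (h | ⟨j, hj⟩)
      · exact ⟨0, h⟩
      · exact ⟨j + 1, hj⟩
    · rintro ⟨j, hj⟩
      cases j with
      | zero => exact Or.inl hj
      | succ j => exact Or.inr ⟨j, hj⟩

theorem pvMain (msg : String) :
    is_fatal_cuda_error_py msg = is_fatal_cuda_error_py_alt msg := by
  rw [Bool.eq_iff_iff]
  unfold is_fatal_cuda_error_py is_fatal_cuda_error_py_alt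
  rw [pvScan_iff]
  simp only [List.any_eq_true, PySem.Str.isIn_iff_infix, PySem.Str.toList_lower]
  constructor
  · rintro ⟨p, hp, hinf⟩
    obtain ⟨j, hj⟩ := (PySem.Chars.exists_prefix_drop_iff_isIn p.toList
        (PySem.Chars.lower msg.toList)).2 ((PySem.Chars.isIn_iff_infix _ _).2 hinf)
    refine ⟨j, p, hp, ?_⟩
    rw [pvMatchAt_iff]
    simpa [PySem.Chars.lower, List.map_drop] using hj
  · rintro ⟨j, p, hp, hm⟩
    rw [pvMatchAt_iff] at hm
    refine ⟨p, hp, ?_⟩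
    rw [← PySem.Chars.isIn_iff_infix, ← PySem.Chars.exists_prefix_drop_iff_isIn]
    exact ⟨j, by simpa [PySem.Chars.lower, List.map_drop] using hm⟩

-- ===== VERDICT (by name: the statement is the Claim_ definition above) =====
theorem is_fatal_cuda_error_py_spec : Claim_equal_is_fatal_cuda_error_py := by
  intro msg _
  unfold Spec_is_fatal_cuda_error_py
  exact pvMain msg
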